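-- pv_equiv track=rewrite | github.com/bryango/MyHelperScripts | .config/argos/aqi/helpers.py | coloring
-- ===== SOURCE A (Python) =====
-- colors = {
--     50: '#009966',
--     100: '#ffde33',
--     150: '#ff9933',
--     200: '#cc0033',
--     300: '#660099',  # '#a804fb', brighter alt
--     350: '#7e0023',  # '#8c4219', brighter alt
-- }
--
-- def coloring(aqi: int) -> str:
--     try:
--         int(aqi)
--     except ValueError:
--         return '#cccccc'
--
--     aqi = min(aqi, 350)
--     level = aqi // 50
--     ceiling = 50 * (level + 1 * int(aqi % 50 != 0))
--     while True:
--         try: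
--             return colors[ceiling]
--         except KeyError:
--             ceiling += 50
-- ===== SOURCE B (Python) =====
-- THRESHOLDS = [
--     (50, '#009966'),
--     (100, '#ffde33'),
--     (150, '#ff9933'),
--     (200, '#cc0033'),
--     (300, '#660099'),
--     (350, '#7e0023'),
-- ]
--
-- def coloring(aqi: int) -> str:
--     try:
--         int(aqi)
--     except ValueError:
--         return '#cccccc'
--
--     aqi = min(aqi, 350)
--     # first threshold >= aqi; the cap guarantees the 350 entry always matches
--     return next(c for t, c in THRESHOLDS if aqi <= t)
-- ===== Notes on version B (the rewrite author's own statement) =====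
-- stated objective: simpler
-- what changed: Replaces the floor-division ceiling arithmetic plus a KeyError-driven while loop over a dict with a single first-match scan of a sorted (threshold, color) list.
import Mathlib
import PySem

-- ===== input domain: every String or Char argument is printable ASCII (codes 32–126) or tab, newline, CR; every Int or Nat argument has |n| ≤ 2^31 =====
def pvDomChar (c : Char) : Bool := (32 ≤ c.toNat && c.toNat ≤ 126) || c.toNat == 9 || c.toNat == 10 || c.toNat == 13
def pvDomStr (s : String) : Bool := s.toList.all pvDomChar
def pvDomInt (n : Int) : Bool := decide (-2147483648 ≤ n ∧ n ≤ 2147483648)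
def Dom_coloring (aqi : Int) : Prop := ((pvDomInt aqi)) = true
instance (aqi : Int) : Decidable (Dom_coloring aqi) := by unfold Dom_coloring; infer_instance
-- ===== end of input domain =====

-- B replaces A's ceiling arithmetic + exception-driven dict probing with a first-match
-- scan over a sorted threshold list (objective: simpler).

-- ===== PORT A =====
def pvColors : PySem.Dict Int String :=
  ((((((PySem.Dict.empty).insert 50 "#009966").insert 100 "#ffde33").insert 150 "#ff9933").insert
      200 "#cc0033").insert 300 "#660099").insert 350 "#7e0023"

-- the 'while True' of A; fuel is an upper bound on the number of +50 probes, unreachable at 0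
def pvLoopA : Nat → Int → String
  | 0, _ => ""
  | Nat.succ f, c =>
    match pvColors.get? c with
    | some s => s
    | none => pvLoopA f (c + 50)

def coloring (aqi : Int) : String :=
  -- int(aqi) on an int never raises, so the ValueError branch is dead for Int inputs
  let a := min aqi 350
  let level := PySem.Int.floordiv a 50
  let ceiling := 50 * (level + (if PySem.Int.mod a 50 ≠ 0 then 1 else 0))
  pvLoopA ((350 - ceiling).toNat / 50 + 1) ceiling

-- ===== PORT B =====
def pvThresholds : List (Int × String) :=
  [(50, "#009966"), (100, "#ffde33"), (150, "#ff9933"), (200, "#cc0033"),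
   (300, "#660099"), (350, "#7e0023")]

def coloring_alt (aqi : Int) : String :=
  let a := min aqi 350
  match pvThresholds.find? (fun p => decide (a ≤ p.1)) with
  | some p => p.2
  | none => ""  -- unreachable: a ≤ 350, so the last entry always matches

-- ===== PRECONDITION & SPEC =====
def Spec_coloring (aqi : Int) (out : String) : Prop := out = coloring_alt aqi
instance (aqi : Int) (out : String) : Decidable (Spec_coloring aqi out) := by unfold Spec_coloring; infer_instance

-- ===== CLAIM (what is proved, stated in full; the proofs are below) =====
def Claim_equal_coloring : Prop := ∀ (aqi : Int), Dom_coloring aqi → Spec_coloring aqi (coloring aqi)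

-- ===== LEMMAS AND PROOFS =====

-- the value A's while-loop settles on, as a function of the starting (50-divisible) ceiling
def pvTarget (c : Int) : String :=
  if c ≤ 50 then "#009966"
  else if c ≤ 100 then "#ffde33"
  else if c ≤ 150 then "#ff9933"
  else if c ≤ 200 then "#cc0033"
  else if c ≤ 300 then "#660099"
  else "#7e0023"

lemma pvLoopA_eval (f : Nat) (c : Int) (hdvd : (50 : Int) ∣ c) (hle : c ≤ 350)
    (hf : 350 < c + 50 * f) : pvLoopA f c = pvTarget c := by
  induction f generalizing c with
  | zero => omega
  | succ f ih =>
    by_cases hk : c = 50 ∨ c = 100 ∨ c = 150 ∨ c = 200 ∨ c = 300 ∨ c = 350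
    · rcases hk with h | h | h | h | h | h <;> subst h <;> rfl
    · have hget : pvColors.get? c = none := by
        simp only [not_or] at hk
        obtain ⟨h1, h2, h3, h4, h5, h6⟩ := hk
        simp [pvColors, PySem.Dict.get?_insert, PySem.Dict.get?_empty, h1, h2, h3, h4, h5, h6]
      have hc0 : c ≤ 0 ∨ c = 250 := by omega
      have hstep : pvLoopA (f + 1) c = pvLoopA f (c + 50) := by
        simp [pvLoopA, hget]
      rw [hstep, ih (c + 50) (by omega) (by omega) (by omega)]
      rcases hc0 with h | h
      · unfold pvTarget; rw [if_pos (by omega), if_pos (by omega)]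
      · subst h; rfl

-- ===== VERDICT (by name: the statement is the Claim_ definition above) =====
theorem coloring_spec : Claim_equal_coloring := by
  intro aqi _
  unfold Spec_coloring coloring coloring_alt
  set a := min aqi 350 with ha
  have ha350 : a ≤ 350 := by simp [ha]
  have hmod := PySem.Int.floordiv_mul_add_mod a 50
  have hmnn := PySem.Int.mod_nonneg a (b := 50) (by norm_num)
  have hmlt := PySem.Int.mod_lt a (b := 50) (by norm_num)
  set l := PySem.Int.floordiv a 50 with hl
  set r := PySem.Int.mod a 50 with hr
  set c : Int := 50 * (l + (if r ≠ 0 then 1 else 0)) with hc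
  have hcd : (50 : Int) ∣ c := Dvd.intro _ rfl
  have hac : a ≤ c ∧ c < a + 50 := by
    by_cases h0 : r = 0 <;> simp [hc, h0] <;> omega
  have hc350 : c ≤ 350 := by omega
  rw [pvLoopA_eval _ c hcd hc350 (by omega)]
  simp only [pvThresholds, List.find?]
  unfold pvTarget
  by_cases h1 : a ≤ 50
  · rw [if_pos (by omega)]; simp [h1]
  by_cases h2 : a ≤ 100
  · rw [if_neg (by omega), if_pos (by omega)]; simp [h1, h2]
  by_cases h3 : a ≤ 150
  · rw [if_neg (by omega), if_neg (by omega), if_pos (by omega)]; simp [h1, h2, h3]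
  by_cases h4 : a ≤ 200
  · rw [if_neg (by omega), if_neg (by omega), if_neg (by omega), if_pos (by omega)]
    simp [h1, h2, h3, h4]
  by_cases h5 : a ≤ 300
  · rw [if_neg (by omega), if_neg (by omega), if_neg (by omega), if_neg (by omega),
      if_pos (by omega)]
    simp [h1, h2, h3, h4, h5]
  · rw [if_neg (by omega), if_neg (by omega), if_neg (by omega), if_neg (by omega),
      if_neg (by omega)]
    simp [h1, h2, h3, h4, h5, ha350]
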